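-- pv_equiv track=rewrite | github.com/AdamZhouSE/pythonHomework | Code/CodeRecords/2121/60708/286803.py | find
-- ===== SOURCE A (Python) =====
-- def find(n):
--     if n==1:
--         return 10
--     else:
--         temp=9
--         k=9
--         for i in range(1,n):
--             temp=temp*k
--             k=k-1
--         return find(n-1)+temp
-- ===== SOURCE B (Python) =====
-- def find(n):
--     # single pass: running product of remaining digit choices, accumulated sum
--     total = 10
--     prod = 9
--     avail = 9
--     for i in range(2, n + 1):
--         prod *= avail
--         avail -= 1
--         total += prod
--     return total
-- ===== Notes on version B (the rewrite author's own statement) =====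
-- stated objective: faster
-- what changed: replaces the recursive calls that each rebuild the digit-product loop from scratch with one forward pass maintaining a running product and accumulating the sum
import Mathlib
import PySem

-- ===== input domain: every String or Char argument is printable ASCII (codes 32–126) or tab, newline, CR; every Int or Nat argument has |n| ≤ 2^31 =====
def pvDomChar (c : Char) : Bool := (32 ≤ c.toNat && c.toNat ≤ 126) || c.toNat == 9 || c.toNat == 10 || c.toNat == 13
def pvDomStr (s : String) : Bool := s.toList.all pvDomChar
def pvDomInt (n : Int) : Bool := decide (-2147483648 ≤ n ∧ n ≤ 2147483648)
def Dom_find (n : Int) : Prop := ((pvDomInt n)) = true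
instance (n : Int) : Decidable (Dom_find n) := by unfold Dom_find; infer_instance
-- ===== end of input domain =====

-- B replaces A's recursion (which rebuilds the digit-product loop from scratch at
-- every recursion level) by one forward pass maintaining a running product.

-- ===== PORT A =====
-- A's inner loop: temp=9; k=9; for i in range(1,n): temp=temp*k; k=k-1; yields temp
def findTemp (n : Int) : Int :=
  ((PySem.List.pyRange 1 n 1).foldl (fun (s : Int × Int) _ => (s.1 * s.2, s.2 - 1)) (9, 9)).1

-- A's recursion find(n) = find(n-1) + temp, descending on n; for n ≤ 0 the Python
-- never terminates (outside Pre_find), so the recursion is carried on n.toNat.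
def findGo : Nat → Int
  | 0 => 0
  | 1 => 10
  | (m + 2) => findGo (m + 1) + findTemp ((m : Int) + 2)

def find (n : Int) : Int := findGo n.toNat

-- ===== PORT B =====
def find_alt (n : Int) : Int :=
  ((PySem.List.pyRange 2 (n + 1) 1).foldl
      (fun (s : Int × Int × Int) _ =>
        let prod := s.2.1 * s.2.2
        (s.1 + prod, prod, s.2.2 - 1))
      (10, 9, 9)).1

-- ===== PRECONDITION & SPEC =====
-- Pre_find excludes n ≤ 0, on which the Python A recurses without end (RecursionError).
def Pre_find (n : Int) : Prop := 1 ≤ n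
instance (n : Int) : Decidable (Pre_find n) := by unfold Pre_find; infer_instance
def pvWitness_find : Int := 3

def Spec_find (n : Int) (out : Int) : Prop := out = find_alt n
instance (n : Int) (out : Int) : Decidable (Spec_find n out) := by unfold Spec_find; infer_instance

-- ===== CLAIM (what is proved, stated in full; the proofs are below) =====
def Claim_equal_find : Prop := ∀ (n : Int), Dom_find n → Pre_find n → Spec_find n (find n)

-- ===== LEMMAS AND PROOFS =====

-- A's inner loop final state: temp = findTemp m, k = 10 - m
lemma tempState_eq (m : Nat) (hm : 1 ≤ m) :
    (PySem.List.pyRange 1 (m : Int) 1).foldl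
        (fun (s : Int × Int) _ => (s.1 * s.2, s.2 - 1)) (9, 9)
      = (findTemp (m : Int), 10 - (m : Int)) := by
  induction m with
  | zero => omega
  | succ k ih =>
    by_cases hk : k = 0
    · subst hk
      norm_num [findTemp, PySem.List.pyRange_one_eq_nil]
    · have hk1 : 1 ≤ k := by omega
      have hr : PySem.List.pyRange 1 ((k : Int) + 1) 1
          = PySem.List.pyRange 1 (k : Int) 1 ++ [(k : Int)] :=
        PySem.List.pyRange_one_succ_right (by exact_mod_cast hk1)
      unfold findTemp at ih ⊢
      push_cast
      rw [hr, List.foldl_append, ih hk1]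
      simp [List.foldl]
      ring

lemma findTemp_succ (m : Nat) (hm : 1 ≤ m) :
    findTemp ((m : Int) + 1) = findTemp (m : Int) * (10 - (m : Int)) := by
  have hr : PySem.List.pyRange 1 ((m : Int) + 1) 1
      = PySem.List.pyRange 1 (m : Int) 1 ++ [(m : Int)] :=
    PySem.List.pyRange_one_succ_right (by exact_mod_cast hm)
  have h := tempState_eq m hm
  unfold findTemp
  rw [hr, List.foldl_append, h]
  simp [List.foldl]

-- B's loop final state after i = 2 .. m: (findGo m, findTemp m, 10 - m)
lemma loopB_state (m : Nat) (hm : 1 ≤ m) :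
    (PySem.List.pyRange 2 ((m : Int) + 1) 1).foldl
        (fun (s : Int × Int × Int) _ =>
          let prod := s.2.1 * s.2.2
          (s.1 + prod, prod, s.2.2 - 1))
        (10, 9, 9)
      = (findGo m, findTemp (m : Int), 10 - (m : Int)) := by
  induction m with
  | zero => omega
  | succ k ih =>
    by_cases hk : k = 0
    · subst hk
      norm_num [findTemp, PySem.List.pyRange_one_eq_nil, findGo]
    · have hk1 : 1 ≤ k := by omega
      obtain ⟨j, rfl⟩ : ∃ j, k = j + 1 := ⟨k - 1, by omega⟩
      have hr : PySem.List.pyRange 2 (((j : Int) + 1) + 1 + 1) 1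
          = PySem.List.pyRange 2 ((j : Int) + 1 + 1) 1 ++ [(j : Int) + 1 + 1] := by
        have := PySem.List.pyRange_one_succ_right
          (a := 2) (b := (j : Int) + 1 + 1) (by omega)
        simpa using this
      have hcast : ((j + 1 + 1 : Nat) : Int) = (j : Int) + 1 + 1 := by push_cast; ring
      rw [hcast, hr, List.foldl_append]
      have ihc : ((j + 1 : Nat) : Int) = (j : Int) + 1 := by push_cast; ring
      rw [ihc] at ih
      rw [ih hk1]
      have hT : findTemp ((j : Int) + 1 + 1) = findTemp ((j : Int) + 1) * (10 - ((j : Int) + 1)) := by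
        have := findTemp_succ (j + 1) (by omega)
        rw [ihc] at this
        simpa using this
      have h2 : ((j : Int) + 2) = (j : Int) + 1 + 1 := by ring
      simp only [List.foldl, findGo, h2, hT]
      refine Prod.ext ?_ (Prod.ext ?_ ?_) <;> simp <;> ring

theorem pv_main (m : Nat) (hm : 1 ≤ m) : findGo m = find_alt (m : Int) := by
  unfold find_alt
  rw [loopB_state m hm]

-- ===== VERDICT (by name: the statement is the Claim_ definition above) =====
theorem find_spec : Claim_equal_find := by
  intro n _ hn
  unfold Pre_find at hn
  unfold Spec_find find
  have h1 : n = ((n.toNat : Nat) : Int) := by omega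
  rw [h1]
  exact pv_main n.toNat (by omega)
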